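-- pv_equiv track=rewrite | github.com/automatic-code-review/acr-cpp-deprecated-method | src/review.py | __group_occurrences_by_file
-- ===== SOURCE A (Python) =====
-- def __group_occurrences_by_file(occurrences):
--     result = {}
--
--     for occurrence in occurrences:
--         path = occurrence['file']
--
--         if path in result:
--             entries = result[path]
--         else:
--             entries = []
--
--         entries.append(occurrence)
--         result[path] = entries
--
--     return result
-- ===== SOURCE B (Python) =====
-- def __group_occurrences_by_file(occurrences):
--     seen = []
--     for occurrence in occurrences:
--         path = occurrence['file']
--         if path not in seen:
--             seen.append(path)
--     return {path: [o for o in occurrences if o['file'] == path]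
--             for path in seen}
-- ===== Notes on version B (the rewrite author's own statement) =====
-- stated objective: alternative
-- what changed: Replaces the single-pass dict-accumulation (look up, append, store back) by a two-phase plan: first collect the distinct file paths in first-seen order, then build each group in one comprehension filtering the whole list per path.
import Mathlib
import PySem

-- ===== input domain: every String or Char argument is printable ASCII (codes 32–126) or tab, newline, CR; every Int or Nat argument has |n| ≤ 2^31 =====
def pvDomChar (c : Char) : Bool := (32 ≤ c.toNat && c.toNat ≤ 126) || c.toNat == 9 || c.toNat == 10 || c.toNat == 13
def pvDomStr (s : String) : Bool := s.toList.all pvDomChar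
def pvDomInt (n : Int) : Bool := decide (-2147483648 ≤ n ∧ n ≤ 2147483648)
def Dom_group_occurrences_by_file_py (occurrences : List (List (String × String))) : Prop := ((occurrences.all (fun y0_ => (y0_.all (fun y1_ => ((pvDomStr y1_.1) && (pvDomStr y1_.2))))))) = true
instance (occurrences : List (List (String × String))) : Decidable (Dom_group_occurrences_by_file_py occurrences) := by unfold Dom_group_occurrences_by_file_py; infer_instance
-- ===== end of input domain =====

-- B groups by two passes (distinct paths in first-seen order, then one filter per path) instead of A's
-- dict-accumulation; structurally different, not faster (objective: alternative).

-- occurrence['file'] on the association-list dict: first matching key, none = KeyError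
def pvLookupFile (o : List (String × String)) : Option String :=
  (o.find? (fun p => p.1 == "file")).map (·.2)

-- ===== PORT A =====
-- loop body of A: path = occurrence['file']; entries = result[path] if path in result else []; entries.append; result[path] = entries
def pvStepA (result : PySem.Dict String (List (List (String × String))))
    (occurrence : List (String × String)) : PySem.Dict String (List (List (String × String))) :=
  match pvLookupFile occurrence with
  | none => result   -- KeyError in Python; excluded by Pre_
  | some path =>
    let entries := if result.contains path then result.getD path [] else []
    result.insert path (entries ++ [occurrence])

def group_occurrences_by_file_py (occurrences : List (List (String × String))) : List (String × List (List (String × String))) :=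
  (occurrences.foldl pvStepA PySem.Dict.empty).items

-- ===== PORT B =====
-- first pass of B: seen.append(path) if path not in seen
def pvStepK (seen : List String) (occurrence : List (String × String)) : List String :=
  match pvLookupFile occurrence with
  | none => seen   -- KeyError in Python; excluded by Pre_
  | some path => PySem.Set.add seen path

def group_occurrences_by_file_py_alt (occurrences : List (List (String × String))) : List (String × List (List (String × String))) :=
  let seen := occurrences.foldl pvStepK []
  seen.map (fun path => (path, occurrences.filter (fun o => pvLookupFile o == some path)))

-- ===== PRECONDITION & SPEC =====
-- Pre_ excludes exactly the inputs where some occurrence has no 'file' key: there Python A raises KeyError.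
def Pre_group_occurrences_by_file_py (occurrences : List (List (String × String))) : Prop :=
  ∀ o ∈ occurrences, ∃ p ∈ o, p.1 = "file"
instance (occurrences : List (List (String × String))) : Decidable (Pre_group_occurrences_by_file_py occurrences) := by unfold Pre_group_occurrences_by_file_py; infer_instance

def pvWitness_group_occurrences_by_file_py : (List (List (String × String))) :=
  [[("file", "a.cpp"), ("line", "3")], [("file", "b.cpp")], [("file", "a.cpp"), ("line", "7")]]

def Spec_group_occurrences_by_file_py (occurrences : List (List (String × String))) (out : List (String × List (List (String × String)))) : Prop := out = group_occurrences_by_file_py_alt occurrences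
instance (occurrences : List (List (String × String))) (out : List (String × List (List (String × String)))) : Decidable (Spec_group_occurrences_by_file_py occurrences out) := by unfold Spec_group_occurrences_by_file_py; infer_instance

-- ===== CLAIM (what is proved, stated in full; the proofs are below) =====
def Claim_equal_group_occurrences_by_file_py : Prop := ∀ (occurrences : List (List (String × String))), Dom_group_occurrences_by_file_py occurrences → Pre_group_occurrences_by_file_py occurrences → Spec_group_occurrences_by_file_py occurrences (group_occurrences_by_file_py occurrences)

-- ===== LEMMAS AND PROOFS =====

theorem pvStepA_none (d : PySem.Dict String (List (List (String × String)))) (o : List (String × String)) (h : pvLookupFile o = none) : pvStepA d o = d := by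
  unfold pvStepA; rw [h]

theorem pvStepA_some (d : PySem.Dict String (List (List (String × String)))) (o : List (String × String)) (path : String) (h : pvLookupFile o = some path) :
    pvStepA d o = d.insert path ((if d.contains path then d.getD path [] else []) ++ [o]) := by
  unfold pvStepA; rw [h]

theorem pvStepK_none (s : List String) (o : List (String × String)) (h : pvLookupFile o = none) : pvStepK s o = s := by
  unfold pvStepK; rw [h]

theorem pvStepK_some (s : List String) (o : List (String × String)) (path : String) (h : pvLookupFile o = some path) : pvStepK s o = PySem.Set.add s path := by
  unfold pvStepK; rw [h]

theorem pvKeys_nodup (l : List (List (String × String))) (s : List String) (hs : s.Nodup) :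
    (l.foldl pvStepK s).Nodup := by
  induction l generalizing s with
  | nil => exact hs
  | cons o l ih =>
    simp only [List.foldl_cons]
    apply ih
    cases h : pvLookupFile o with
    | none => rw [pvStepK_none _ _ h]; exact hs
    | some p => rw [pvStepK_some _ _ _ h]; exact PySem.Set.nodup_add _ _ hs

theorem pvMem_keys (l : List (List (String × String))) (s : List String) (q : String) :
    q ∈ l.foldl pvStepK s ↔ q ∈ s ∨ ∃ o ∈ l, pvLookupFile o = some q := by
  induction l generalizing s with
  | nil => simp
  | cons o l ih =>
    simp only [List.foldl_cons, ih, List.mem_cons]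
    cases h : pvLookupFile o with
    | none =>
      rw [pvStepK_none _ _ h]
      constructor
      · rintro (hq | ⟨o', ho', hl⟩)
        · exact Or.inl hq
        · exact Or.inr ⟨o', Or.inr ho', hl⟩
      · rintro (hq | ⟨o', (rfl | ho'), hl⟩)
        · exact Or.inl hq
        · rw [h] at hl; cases hl
        · exact Or.inr ⟨o', ho', hl⟩
    | some p =>
      rw [pvStepK_some _ _ _ h]
      constructor
      · rintro (hq | ⟨o', ho', hl⟩)
        · rcases (PySem.Set.mem_add _ _ _).mp hq with hq | rfl
          · exact Or.inl hq
          · exact Or.inr ⟨o, Or.inl rfl, h⟩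
        · exact Or.inr ⟨o', Or.inr ho', hl⟩
      · rintro (hq | ⟨o', (rfl | ho'), hl⟩)
        · exact Or.inl ((PySem.Set.mem_add _ _ _).mpr (Or.inl hq))
        · rw [h] at hl; injection hl with e
          exact Or.inl ((PySem.Set.mem_add _ _ _).mpr (Or.inr e.symm))
        · exact Or.inr ⟨o', ho', hl⟩

theorem pvFilter_nil_of_not_mem (l : List (List (String × String))) (q : String)
    (h : q ∉ l.foldl pvStepK []) :
    l.filter (fun o => pvLookupFile o == some q) = [] := by
  rw [List.filter_eq_nil_iff]
  intro o ho
  simp only [beq_iff_eq]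
  intro hlo
  exact h ((pvMem_keys l [] q).mpr (Or.inr ⟨o, ho, hlo⟩))

-- the invariant: A's dict after folding l is exactly B's result for l, as a literal Dict
theorem pvFold_eq (l : List (List (String × String))) :
    l.foldl pvStepA PySem.Dict.empty =
      PySem.Dict.mk ((l.foldl pvStepK []).map
        (fun path => (path, l.filter (fun o => pvLookupFile o == some path)))) := by
  induction l using List.reverseRecOn with
  | nil => rfl
  | append_singleton l o ih =>
    rw [List.foldl_append, List.foldl_append, ih]
    simp only [List.foldl_cons, List.foldl_nil]
    set Kl := l.foldl pvStepK [] with hKl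
    cases h : pvLookupFile o with
    | none =>
      rw [pvStepA_none _ _ h, pvStepK_none _ _ h]
      apply PySem.Dict.ext
      apply List.map_congr_left
      intro p _
      simp [List.filter_append, h]
    | some path =>
      rw [pvStepA_some _ _ _ h, pvStepK_some _ _ _ h]
      have hkeys : (PySem.Dict.mk (Kl.map
          (fun path => (path, l.filter (fun o => pvLookupFile o == some path))))).keys = Kl := by
        simp [PySem.Dict.keys, List.map_map, Function.comp_def]
      have hnodup : Kl.Nodup := pvKeys_nodup l [] List.nodup_nil
      by_cases hmem : path ∈ Kl
      · have hcont : (PySem.Dict.mk (Kl.map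
            (fun path => (path, l.filter (fun o => pvLookupFile o == some path))))).contains path = true := by
          rw [PySem.Dict.contains_eq_decide_mem_keys, hkeys]; simpa
        have hgetD : (PySem.Dict.mk (Kl.map
            (fun path => (path, l.filter (fun o => pvLookupFile o == some path))))).getD path []
              = l.filter (fun o => pvLookupFile o == some path) := by
          apply PySem.Dict.getD_of_mem_items
          · exact List.mem_map.mpr ⟨path, hmem, rfl⟩
          · rw [hkeys]; exact hnodup
        rw [PySem.Set.add_of_mem hmem]
        apply PySem.Dict.ext
        rw [PySem.Dict.items_insert_of_contains _ _ hcont]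
        simp only [hcont, if_true, hgetD, List.map_map]
        apply List.map_congr_left
        intro p hp
        by_cases hpq : p = path
        · subst hpq
          simp [List.filter_append, h]
        · simp [List.filter_append, h, Ne.symm hpq]
          exact hpq
      · have hcont : (PySem.Dict.mk (Kl.map
            (fun path => (path, l.filter (fun o => pvLookupFile o == some path))))).contains path = false := by
          rw [PySem.Dict.contains_eq_decide_mem_keys, hkeys]; simpa
        rw [PySem.Set.add_of_not_mem hmem]
        apply PySem.Dict.ext
        rw [PySem.Dict.items_insert_of_not_contains _ _ hcont]
        simp only [List.map_append, List.map_cons, List.map_nil]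
        congr 1
        · apply List.map_congr_left
          intro p hp
          have hpq : p ≠ path := fun e => hmem (e ▸ hp)
          simp [List.filter_append, h, Ne.symm hpq]
        · have hfil : l.filter (fun o => pvLookupFile o == some path) = [] :=
            pvFilter_nil_of_not_mem l path hmem
          simp [List.filter_append, h, hfil]
          intro hm
          exact absurd hm hmem

-- ===== VERDICT (by name: the statement is the Claim_ definition above) =====
theorem group_occurrences_by_file_py_spec : Claim_equal_group_occurrences_by_file_py := by
  intro occurrences _ _
  unfold Spec_group_occurrences_by_file_py group_occurrences_by_file_py group_occurrences_by_file_py_alt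
  rw [pvFold_eq]
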